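-- pv_equiv track=rewrite | github.com/Kudito98/Codesignal-tasks | python-arcade/77-mergingVines/mergingVines.py | solution
-- ===== SOURCE A (Python) =====
-- def solution(vines, n):
--     def nTimes(n):
--         def decorator(func):
--             def wrapper(bottles):
--                 res = bottles
--                 for i in range(n):
--                     res = func(res)
--                 return res
--             return wrapper
--         return decorator
--
--     @nTimes(n)
--     def sumOnce(vines):
--         res = [vines[i] + vines[i + 1] for i in range(0, len(vines) - 1, 2)]
--         if len(vines) % 2 == 1:
--             res.append(vines[-1])
--         return res
--
--     return sumOnce(vines)
-- ===== SOURCE B (Python) =====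
-- def solution(vines, n):
--     # After n halving passes, output element j is the sum of the contiguous
--     # block of size 2**n starting at j*2**n (capped once blocks cover the list).
--     if n <= 0:
--         return list(vines)
--     b = 1 << min(n, len(vines).bit_length())
--     res = []
--     i = 0
--     while i < len(vines):
--         res.append(sum(vines[i:i + b]))
--         i += b
--     return res
-- ===== Notes on version B (the rewrite author's own statement) =====
-- stated objective: faster
-- what changed: Replaces the n repeated adjacent-pair merging passes with a single pass that sums contiguous blocks of size 2^n (capped by bit_length so huge n costs nothing), using a closed-form characterisation of the result.
import Mathlib
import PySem

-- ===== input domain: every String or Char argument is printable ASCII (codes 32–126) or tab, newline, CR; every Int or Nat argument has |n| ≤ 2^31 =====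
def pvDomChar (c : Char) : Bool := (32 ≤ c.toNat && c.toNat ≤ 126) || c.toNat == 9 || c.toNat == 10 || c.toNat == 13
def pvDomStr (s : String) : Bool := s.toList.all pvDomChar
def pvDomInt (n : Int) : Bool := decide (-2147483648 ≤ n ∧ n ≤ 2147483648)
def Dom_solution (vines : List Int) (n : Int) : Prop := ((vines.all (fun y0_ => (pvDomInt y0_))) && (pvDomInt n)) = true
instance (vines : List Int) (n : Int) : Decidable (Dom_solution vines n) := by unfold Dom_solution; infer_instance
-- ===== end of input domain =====

-- B replaces A's n repeated pair-merging passes by one pass summing blocks of size 2^n (capped): faster.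

-- ===== PORT A =====
-- one merging pass: [vines[i]+vines[i+1] for i in range(0, len(vines)-1, 2)], plus the odd tail.
-- pyGetD is used for vines[i]: every index reached here is in range, so it equals Python's vines[i].
def sumOnceA (v : List Int) : List Int :=
  let res := (PySem.List.pyRange 0 ((v.length : Int) - 1) 2).map
      (fun i => PySem.List.pyGetD v i 0 + PySem.List.pyGetD v (i + 1) 0)
  if v.length % 2 = 1 then res ++ [PySem.List.pyGetD v (-1) 0] else res

-- the nTimes decorator: res = vines; for i in range(n): res = sumOnce(res)
def solution (vines : List Int) (n : Int) : List Int :=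
  (PySem.List.pyRange 0 n 1).foldl (fun res _ => sumOnceA res) vines

-- ===== PORT B =====
-- the while loop of Source B: recursion over the remaining suffix, chunk size b (b ≥ 1)
def chunkLoop (b : Nat) (v : List Int) : List Int :=
  match v with
  | [] => []
  | x :: t => ((x :: t).take b).sum :: chunkLoop b (t.drop (b - 1))
termination_by v.length
decreasing_by simp only [List.length_drop, List.length_cons]; omega

def solution_alt (vines : List Int) (n : Int) : List Int :=
  if n ≤ 0 then vines
  else chunkLoop (2 ^ (min n.toNat (Nat.size vines.length))) vines

-- ===== PRECONDITION & SPEC =====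
def Spec_solution (vines : List Int) (n : Int) (out : List Int) : Prop := out = solution_alt vines n
instance (vines : List Int) (n : Int) (out : List Int) : Decidable (Spec_solution vines n out) := by unfold Spec_solution; infer_instance

-- ===== CLAIM (what is proved, stated in full; the proofs are below) =====
def Claim_equal_solution : Prop := ∀ (vines : List Int) (n : Int), Dom_solution vines n → Spec_solution vines n (solution vines n)

-- ===== LEMMAS AND PROOFS =====

theorem chunkLoop_nil (b : Nat) : chunkLoop b [] = [] := by
  rw [chunkLoop.eq_def]

theorem chunkLoop_cons (b : Nat) (x : Int) (t : List Int) :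
    chunkLoop b (x :: t) = ((x :: t).take b).sum :: chunkLoop b (t.drop (b - 1)) := by
  rw [chunkLoop.eq_def]

theorem chunkLoop_cons_eq (b : Nat) (hb : 1 ≤ b) (v : List Int) (hv : v ≠ []) :
    chunkLoop b v = (v.take b).sum :: chunkLoop b (v.drop b) := by
  cases v with
  | nil => exact absurd rfl hv
  | cons x t =>
    rw [chunkLoop_cons]
    obtain ⟨c, rfl⟩ : ∃ c, b = c + 1 := ⟨b - 1, by omega⟩
    simp

theorem chunkLoop_one (v : List Int) : chunkLoop 1 v = v := by
  match v with
  | [] => exact chunkLoop_nil 1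
  | x :: t =>
    rw [chunkLoop_cons]
    simp [chunkLoop_one t]

theorem chunkLoop_of_len_le (b : Nat) (hb : 1 ≤ b) (v : List Int) (hv : v ≠ [])
    (h : v.length ≤ b) : chunkLoop b v = [v.sum] := by
  rw [chunkLoop_cons_eq b hb v hv, List.take_of_length_le h, List.drop_eq_nil_of_le h,
    chunkLoop_nil]

theorem chunkLoop_two_cons (s1 s2 : Int) (rest : List Int) :
    chunkLoop 2 (s1 :: s2 :: rest) = (s1 + s2) :: chunkLoop 2 rest := by
  rw [chunkLoop_cons]; simp

theorem chunkLoop_comp (b : Nat) (hb : 1 ≤ b) (v : List Int) :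
    chunkLoop 2 (chunkLoop b v) = chunkLoop (2 * b) v := by
  match v with
  | [] => simp [chunkLoop_nil]
  | x :: t =>
    have hvne : (x :: t) ≠ [] := by simp
    rw [chunkLoop_cons_eq b hb _ hvne]
    by_cases hd : (x :: t).drop b = []
    · rw [hd, chunkLoop_nil]
      have hlen : (x :: t).length ≤ b := by
        have := List.drop_eq_nil_iff.mp hd; omega
      rw [chunkLoop_of_len_le 2 (by omega) _ (by simp) (by simp),
        chunkLoop_of_len_le (2 * b) (by omega) _ hvne (by omega)]
      rw [List.take_of_length_le hlen]
      simp
    · rw [chunkLoop_cons_eq b hb _ hd, List.drop_drop, chunkLoop_two_cons]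
      rw [chunkLoop_comp b hb ((x :: t).drop (b + b))]
      rw [chunkLoop_cons_eq (2 * b) (by omega) _ hvne]
      have hsum : ((x :: t).take b).sum + (((x :: t).drop b).take b).sum
          = ((x :: t).take (2 * b)).sum := by
        rw [two_mul, List.take_add, List.sum_append, List.take_drop]
      rw [hsum, two_mul]
termination_by v.length
decreasing_by simp only [List.length_drop, List.length_cons]; omega

theorem foldl_const_iterate {α : Type} (g : α → α) (l : List Int) (init : α) :
    l.foldl (fun r _ => g r) init = g^[l.length] init := by
  induction l generalizing init with
  | nil => rfl
  | cons x t ih => simp [List.foldl_cons, ih, Function.iterate_succ_apply]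

theorem sumOnceA_nil : sumOnceA [] = [] := by decide

theorem sumOnceA_single (x : Int) : sumOnceA [x] = [x] := by
  have hlast : PySem.List.pyGetD [x] (-1) (0:Int) = x := by
    rw [PySem.List.pyGetD_neg_one _ _ (by simp)]; simp
  simp only [sumOnceA]
  rw [PySem.List.pyRange_of_pos 0 _ (by norm_num : (0:Int) < 2)]
  simp [hlast]

theorem comp_cons₂ (a c : Int) (t : List Int) :
    ((PySem.List.pyRange 0 (((a :: c :: t).length : Int) - 1) 2).map
      (fun i => PySem.List.pyGetD (a :: c :: t) i 0 + PySem.List.pyGetD (a :: c :: t) (i + 1) 0))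
    = (a + c) :: ((PySem.List.pyRange 0 ((t.length : Int) - 1) 2).map
      (fun i => PySem.List.pyGetD t i 0 + PySem.List.pyGetD t (i + 1) 0)) := by
  rw [PySem.List.pyRange_of_pos 0 _ (by norm_num : (0:Int) < 2),
      PySem.List.pyRange_of_pos 0 _ (by norm_num : (0:Int) < 2)]
  have hN1 : (if (0:Int) < ((a :: c :: t).length : Int) - 1 then
      ((((a :: c :: t).length : Int) - 1 - 0 + 2 - 1) / 2).toNat else 0) = t.length / 2 + 1 := by
    simp only [List.length_cons]
    split_ifs <;> omega
  have hN2 : (if (0:Int) < ((t.length : Int)) - 1 then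
      (((t.length : Int) - 1 - 0 + 2 - 1) / 2).toNat else 0) = t.length / 2 := by
    split_ifs <;> omega
  rw [hN1, hN2, List.range_succ_eq_map, List.map_cons, List.map_cons, List.map_map,
      List.map_map]
  congr 1
  · -- head: indices 0 and 1
    show PySem.List.pyGetD (a :: c :: t) (0 + 2 * ((0:Nat):Int)) 0
        + PySem.List.pyGetD (a :: c :: t) (0 + 2 * ((0:Nat):Int) + 1) 0 = a + c
    norm_num
    rw [PySem.List.pyGetD_ofNat']
    rfl
  · rw [List.map_map]
    apply List.map_congr_left
    intro k _
    show PySem.List.pyGetD (a :: c :: t) (0 + 2 * ((k+1 : Nat):Int)) 0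
        + PySem.List.pyGetD (a :: c :: t) (0 + 2 * ((k+1 : Nat):Int) + 1) 0
      = PySem.List.pyGetD t (0 + 2 * ((k : Nat):Int)) 0
        + PySem.List.pyGetD t (0 + 2 * ((k : Nat):Int) + 1) 0
    rw [show (0:Int) + 2 * ((k+1 : Nat):Int) = ((2*k+2 : Nat):Int) by push_cast; ring,
        show ((2*k+2 : Nat):Int) + 1 = ((2*k+3 : Nat):Int) by push_cast; ring,
        show (0:Int) + 2 * ((k : Nat):Int) = ((2*k : Nat):Int) by push_cast; ring,
        show ((2*k : Nat):Int) + 1 = ((2*k+1 : Nat):Int) by push_cast; ring,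
        PySem.List.pyGetD_natCast, PySem.List.pyGetD_natCast,
        PySem.List.pyGetD_natCast, PySem.List.pyGetD_natCast,
        show 2*k+2 = (2*k)+1+1 by ring, show 2*k+3 = (2*k+1)+1+1 by ring,
        List.getD_cons_succ, List.getD_cons_succ, List.getD_cons_succ, List.getD_cons_succ]

theorem sumOnceA_cons₂ (a c : Int) (t : List Int) :
    sumOnceA (a :: c :: t) = (a + c) :: sumOnceA t := by
  have hmod : (a :: c :: t).length % 2 = t.length % 2 := by simp [List.length_cons]; omega
  by_cases hodd : t.length % 2 = 1
  · have ht : t ≠ [] := by rintro rfl; simp at hodd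
    simp only [sumOnceA, comp_cons₂, hmod, hodd, if_pos]
    rw [PySem.List.pyGetD_neg_one _ _ (by simp : (a :: c :: t) ≠ []),
        PySem.List.pyGetD_neg_one _ _ ht]
    have hlast : (a :: c :: t).getLast (by simp) = t.getLast ht := by
      rw [List.getLast_cons (by simp : (c :: t) ≠ []), List.getLast_cons ht]
    rw [hlast]
    simp
  · simp only [sumOnceA, comp_cons₂, hmod, hodd]
    simp

theorem sumOnceA_eq_chunkLoop (v : List Int) : sumOnceA v = chunkLoop 2 v := by
  match v with
  | [] => rw [sumOnceA_nil, chunkLoop_nil]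
  | [x] =>
    rw [sumOnceA_single, chunkLoop_cons]
    simp [chunkLoop_nil]
  | a :: c :: t =>
    rw [sumOnceA_cons₂, chunkLoop_two_cons, sumOnceA_eq_chunkLoop t]
termination_by v.length
decreasing_by simp only [List.length_cons]; omega

theorem solution_eq_iter (vines : List Int) (n : Int) :
    solution vines n = sumOnceA^[n.toNat] vines := by
  unfold solution
  rw [foldl_const_iterate, PySem.List.length_pyRange_one]
  norm_num

theorem iter_eq_chunkLoop (k : Nat) (v : List Int) :
    sumOnceA^[k] v = chunkLoop (2 ^ k) v := by
  induction k generalizing v with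
  | zero => simp [chunkLoop_one]
  | succ k ih =>
    rw [Function.iterate_succ_apply', ih, sumOnceA_eq_chunkLoop,
        chunkLoop_comp _ Nat.one_le_two_pow, show 2 * 2 ^ k = 2 ^ (k+1) by ring]

-- ===== VERDICT (by name: the statement is the Claim_ definition above) =====
theorem solution_spec : Claim_equal_solution := by
  intro vines n _
  unfold Spec_solution solution_alt
  by_cases hn : n ≤ 0
  · rw [if_pos hn]
    unfold solution
    rw [PySem.List.pyRange_one_eq_nil hn]
    rfl
  · rw [if_neg hn, solution_eq_iter, iter_eq_chunkLoop]
    by_cases hk : n.toNat ≤ Nat.size vines.length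
    · rw [min_eq_left hk]
    · rw [min_eq_right (by omega)]
      match vines with
      | [] => rw [chunkLoop_nil, chunkLoop_nil]
      | x :: t =>
        have h1 : (x :: t).length < 2 ^ Nat.size (x :: t).length := Nat.lt_size_self _
        have h2 : (x :: t).length ≤ 2 ^ n.toNat :=
          le_trans (le_of_lt h1) (Nat.pow_le_pow_right (by omega) (by omega))
        rw [chunkLoop_of_len_le _ Nat.one_le_two_pow _ (by simp) h2,
            chunkLoop_of_len_le _ Nat.one_le_two_pow _ (by simp) (le_of_lt h1)]
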